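-- pv_equiv track=rewrite | github.com/srikantharun/test-api | hw/impl/europa/dft/scripts/sdc_simplifier.py | strings_match_except_numbers
-- ===== SOURCE A (Python) =====
-- def strings_match_except_numbers(str1, str2):
--     """
--     Check if two strings match except for numbers in the same positions.
--     Returns: (bool, list of positions) where numbers differ
--     """
--     if len(str1) != len(str2):
--         return False, []
--
--     diff_positions = []
--
--     for i in range(len(str1)):
--         if str1[i] != str2[i]:
--             # If both characters are digits, record the position
--             if str1[i].isdigit() and str2[i].isdigit():
--                 diff_positions.append(i)
--             # If one is digit and other isn't, or both are non-digits
--             else: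
--                 return False, []
--
--     return len(diff_positions) > 0, diff_positions
-- ===== SOURCE B (Python) =====
-- def strings_match_except_numbers(str1, str2):
--     """Canonicalization approach: mask every digit to a sentinel and compare
--     the masked sequences wholesale; if the masks agree, the raw differing
--     positions are exactly the digit-vs-digit mismatches."""
--     def mask(s):
--         return [None if c.isdigit() else c for c in s]
--     if mask(str1) != mask(str2):
--         return False, []
--     diffs = [i for i, (a, b) in enumerate(zip(str1, str2)) if a != b]
--     return bool(diffs), diffs
-- ===== Notes on version B (the rewrite author's own statement) =====
-- stated objective: alternative
-- what changed: Replaced A's per-position early-exit validation loop by a canonicalization algorithm: every digit is masked to a sentinel, the two masked sequences are compared wholesale, and only if they are equal are the raw differing positions enumerated (all per-position digit checks disappear from the diff pass).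
import Mathlib
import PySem

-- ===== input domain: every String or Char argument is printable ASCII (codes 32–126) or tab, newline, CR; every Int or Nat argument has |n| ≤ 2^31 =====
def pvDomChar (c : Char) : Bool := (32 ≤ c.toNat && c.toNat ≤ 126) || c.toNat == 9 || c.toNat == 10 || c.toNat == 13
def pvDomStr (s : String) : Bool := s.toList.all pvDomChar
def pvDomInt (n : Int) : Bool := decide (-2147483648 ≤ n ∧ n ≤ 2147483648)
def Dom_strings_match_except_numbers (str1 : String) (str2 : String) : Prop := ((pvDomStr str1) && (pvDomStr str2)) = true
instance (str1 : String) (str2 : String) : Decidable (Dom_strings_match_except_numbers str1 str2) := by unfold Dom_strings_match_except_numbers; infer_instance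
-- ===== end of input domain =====

-- B masks digits to a sentinel and compares the masked sequences wholesale instead of validating each mismatch in the scan (objective: alternative, same cost).

-- ===== PORT A =====
-- A's indexed loop with early return, transcribed as structural recursion over both
-- character lists with the running index i and the diff_positions accumulator.
def pvGoA : List Char → List Char → Int → List Int → Bool × List Int
  | [], [], _, acc => (decide (acc.length > 0), acc)
  | a :: as, b :: bs, i, acc =>
    if a ≠ b then
      if PySem.Chars.isdigit a && PySem.Chars.isdigit b then
        pvGoA as bs (i + 1) (acc ++ [i])
      else (false, [])
    else pvGoA as bs (i + 1) acc
  | _, _, _, _ => (false, [])   -- unreachable: lists have equal length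

def strings_match_except_numbers (str1 : String) (str2 : String) : Bool × List Int :=
  if str1.toList.length ≠ str2.toList.length then (false, [])
  else pvGoA str1.toList str2.toList 0 []

-- ===== PORT B =====
-- Source B's mask: digits become the sentinel None, everything else stays itself.
def pvMaskB (l : List Char) : List (Option Char) :=
  l.map (fun c => if PySem.Chars.isdigit c then none else some c)

def strings_match_except_numbers_alt (str1 : String) (str2 : String) : Bool × List Int :=
  if pvMaskB str1.toList ≠ pvMaskB str2.toList then (false, [])
  else
    let diffs := ((PySem.List.enumerate (str1.toList.zip str2.toList) 0).filter
      (fun p => p.2.1 ≠ p.2.2)).map (·.1)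
    (!diffs.isEmpty, diffs)

-- ===== PRECONDITION & SPEC =====
def Spec_strings_match_except_numbers (str1 : String) (str2 : String) (out : Bool × List Int) : Prop := out = strings_match_except_numbers_alt str1 str2
instance (str1 : String) (str2 : String) (out : Bool × List Int) : Decidable (Spec_strings_match_except_numbers str1 str2 out) := by unfold Spec_strings_match_except_numbers; infer_instance

-- ===== CLAIM (what is proved, stated in full; the proofs are below) =====
def Claim_equal_strings_match_except_numbers : Prop := ∀ (str1 : String) (str2 : String), Dom_strings_match_except_numbers str1 str2 → Spec_strings_match_except_numbers str1 str2 (strings_match_except_numbers str1 str2)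

-- ===== LEMMAS AND PROOFS =====

-- Loop invariant: A's scan from index i with accumulator acc equals B's
-- mask-compare-then-enumerate computation on the remaining suffix.
lemma pvGoA_eq (l1 : List Char) : ∀ (l2 : List Char), l1.length = l2.length → ∀ (i : Int) (acc : List Int),
    pvGoA l1 l2 i acc =
      (if pvMaskB l1 ≠ pvMaskB l2 then (false, [])
       else
         let ds := acc ++ ((PySem.List.enumerate (l1.zip l2) i).filter
           (fun p => p.2.1 ≠ p.2.2)).map (·.1)
         (decide (ds.length > 0), ds)) := by
  induction l1 with
  | nil =>
    intro l2 h i acc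
    cases l2 with
    | nil => simp [pvGoA, pvMaskB, PySem.List.enumerate]
    | cons b bs => simp at h
  | cons a as ih =>
    intro l2 h i acc
    cases l2 with
    | nil => simp at h
    | cons b bs =>
      simp only [List.length_cons, Nat.add_right_cancel_iff] at h
      simp only [pvGoA, pvMaskB, List.map_cons, List.zip_cons_cons,
        PySem.List.enumerate_cons, List.filter_cons]
      by_cases hab : a = b
      · subst hab
        simp only [ne_eq, not_true_eq_false, decide_false, Bool.false_eq_true, if_false, ite_false]
        have := ih bs h (i + 1) acc
        simp only [pvMaskB] at this
        rw [this]
        simp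
      · simp only [ne_eq, hab, not_false_eq_true, decide_true, if_true, ite_true]
        by_cases hd : (PySem.Chars.isdigit a && PySem.Chars.isdigit b) = true
        · obtain ⟨hda, hdb⟩ := Bool.and_eq_true_iff.mp hd
          simp only [hd, if_true, hda, hdb, ite_true]
          have := ih bs h (i + 1) (acc ++ [i])
          simp only [pvMaskB] at this
          rw [this]
          simp
        · simp only [hd, if_false, Bool.false_eq_true, ite_false]
          -- heads of the masks differ, so the masked lists differ
          have hne : (if PySem.Chars.isdigit a then (none : Option Char) else some a) ≠
              (if PySem.Chars.isdigit b then (none : Option Char) else some b) := by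
            rcases Bool.eq_false_or_eq_true (PySem.Chars.isdigit a) with ha | ha <;>
            rcases Bool.eq_false_or_eq_true (PySem.Chars.isdigit b) with hb | hb <;>
              simp [ha, hb, hab] at hd ⊢
          simp [hne]

theorem strings_match_except_numbers_spec : Claim_equal_strings_match_except_numbers := by
  intro str1 str2 _
  unfold Spec_strings_match_except_numbers strings_match_except_numbers strings_match_except_numbers_alt
  by_cases h : str1.toList.length = str2.toList.length
  · simp only [h, ne_eq, not_true_eq_false, if_false]
    rw [pvGoA_eq _ _ h 0 []]
    simp only [List.nil_append]
    split
    · rfl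
    · cases hd : ((PySem.List.enumerate (str1.toList.zip str2.toList) 0).filter
        (fun p => p.2.1 ≠ p.2.2)).map (·.1) <;> simp
  · have hm : pvMaskB str1.toList ≠ pvMaskB str2.toList := by
      intro he
      apply h
      have := congrArg List.length he
      simpa [pvMaskB] using this
    have h' : str1.length ≠ str2.length := by simpa using h
    simp [h', hm]
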